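-- pv_equiv track=rewrite | github.com/morefreeze/morefreeze.github.io | code/knight_tour.py | canonical_form
-- ===== SOURCE A (Python) =====
-- from typing import Generator, List, Tuple, Optional, Dict, Any
--
-- _SYMMETRIES = [
--     lambda r, c, n: (r, c),                  # 0: identity
--     lambda r, c, n: (c, n-1-r),              # 1: rot 90°
--     lambda r, c, n: (n-1-r, n-1-c),          # 2: rot 180°
--     lambda r, c, n: (n-1-c, r),              # 3: rot 270°
--     lambda r, c, n: (r, n-1-c),              # 4: flip horizontal (reflect about vertical axis)
--     lambda r, c, n: (n-1-r, c),              # 5: flip vertical   (reflect about horizontal axis)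
--     lambda r, c, n: (c, r),                  # 6: flip main diagonal
--     lambda r, c, n: (n-1-c, n-1-r),         # 7: flip antidiagonal
-- ]
--
-- def apply_symmetry(path: List[Tuple[int, int]], sym: int, n: int) -> List[Tuple[int, int]]:
--     """Apply symmetry transformation sym (0-7) to each cell in path."""
--     f = _SYMMETRIES[sym]
--     return [f(r, c, n) for r, c in path]
--
-- def canonical_form(path: List[Tuple[int, int]], n: int) -> Tuple:
--     """
--     Return the canonical (lexicographically smallest) representative of the
--     equivalence class of a closed tour under the 8 dihedral symmetries and
--     all n² cyclic rotations, as well as path reversal.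
--
--     A closed tour is treated as a cyclic sequence, so we consider:
--       - 8 symmetries
--       - n² cyclic shifts of the path
--       - reversal of the path (direction)
--     giving at most 16 * n² candidates.  The canonical form is the
--     lexicographically smallest tuple among all of them.
--     """
--     m = len(path)
--     best = None
--     for sym in range(8):
--         transformed = apply_symmetry(path, sym, n)
--         for direction in [transformed, list(reversed(transformed))]:
--             for start in range(m):
--                 rotated = tuple(direction[start:] + direction[:start])
--                 if best is None or rotated < best:
--                     best = rotated
--     return best
-- ===== SOURCE B (Python) =====
-- def canonical_form(path, n):
--     """Canonical form by simultaneous column-wise elimination: keep one pool of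
--     (sequence, start) candidates over all 16 symmetry/direction sequences and
--     refine it one position at a time; no whole rotations are built or compared."""
--     m = len(path)
--     seqs = []
--     for f in [lambda r, c: (r, c),
--               lambda r, c: (c, n - 1 - r),
--               lambda r, c: (n - 1 - r, n - 1 - c),
--               lambda r, c: (n - 1 - c, r),
--               lambda r, c: (r, n - 1 - c),
--               lambda r, c: (n - 1 - r, c),
--               lambda r, c: (c, r),
--               lambda r, c: (n - 1 - c, n - 1 - r)]:
--         t = [f(r, c) for r, c in path]
--         seqs.append(t + t)
--         rt = t[::-1]
--         seqs.append(rt + rt)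
--     cands = [(s, i) for s in range(16) for i in range(m)]
--     for k in range(m):
--         lo = min(seqs[s][i + k] for s, i in cands)
--         cands = [(s, i) for s, i in cands if seqs[s][i + k] == lo]
--     s0, i0 = cands[0]
--     return tuple(seqs[s0][i0:i0 + m])
-- ===== Notes on version B (the rewrite author's own statement) =====
-- stated objective: faster
-- what changed: A materializes and lexicographically compares all 16*m rotations against a running best; B never builds or compares rotations: it keeps one pool of (sequence,start) candidates over the 16 doubled symmetry/direction sequences and eliminates candidates column by column (keep only those whose k-th cell equals the column minimum), reading the winner off at the end.
-- outside the precondition, e.g. on canonical_form([], 5): A returns None, B raises IndexError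
import Mathlib
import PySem

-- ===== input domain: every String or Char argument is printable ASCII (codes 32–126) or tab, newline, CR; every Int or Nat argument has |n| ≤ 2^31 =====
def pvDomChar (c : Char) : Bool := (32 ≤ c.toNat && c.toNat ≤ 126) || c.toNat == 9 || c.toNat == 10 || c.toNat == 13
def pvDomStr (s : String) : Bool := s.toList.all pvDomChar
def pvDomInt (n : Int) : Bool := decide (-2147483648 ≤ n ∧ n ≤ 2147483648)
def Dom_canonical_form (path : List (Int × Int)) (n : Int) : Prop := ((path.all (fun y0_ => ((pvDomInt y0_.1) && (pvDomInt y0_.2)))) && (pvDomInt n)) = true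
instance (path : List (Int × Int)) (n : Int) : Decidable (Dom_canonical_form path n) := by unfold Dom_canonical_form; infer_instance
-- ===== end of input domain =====

-- B replaces A's build-and-compare of all 16·m rotations by a column-wise elimination of one
-- pool of (sequence, start) candidates over the 16 doubled sequences (objective: faster).

-- Python's '<' on pairs of ints (comparison helper shared by both ports)
def pvPairLt (a b : Int × Int) : Bool := a.1 < b.1 || (a.1 == b.1 && a.2 < b.2)

def pvLexLt : List (Int × Int) → List (Int × Int) → Bool
  | _, [] => false
  | [], _ :: _ => true
  | a :: u, b :: v => pvPairLt a b || (a == b && pvLexLt u v)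

-- ===== PORT A =====
-- _SYMMETRIES[sym] for sym in range(8): the indexed lambda table, as a case split on sym
def pvSymFun (sym : Int) (r c n : Int) : Int × Int :=
  if sym = 0 then (r, c)
  else if sym = 1 then (c, n - 1 - r)
  else if sym = 2 then (n - 1 - r, n - 1 - c)
  else if sym = 3 then (n - 1 - c, r)
  else if sym = 4 then (r, n - 1 - c)
  else if sym = 5 then (n - 1 - r, c)
  else if sym = 6 then (c, r)
  else (n - 1 - c, n - 1 - r)

def apply_symmetry (path : List (Int × Int)) (sym : Int) (n : Int) : List (Int × Int) :=
  path.map (fun p => pvSymFun sym p.1 p.2 n)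

-- 'if best is None or rotated < best: best = rotated'
def pvStep (best : Option (List (Int × Int))) (rotated : List (Int × Int)) : Option (List (Int × Int)) :=
  match best with
  | none => some rotated
  | some b => if pvLexLt rotated b then some rotated else some b

def canonical_form (path : List (Int × Int)) (n : Int) : List (Int × Int) :=
  let m : Int := (path.length : Int)
  let best :=
    (PySem.List.pyRange 0 8 1).foldl (fun best sym =>
      let transformed := apply_symmetry path sym n
      [transformed, transformed.reverse].foldl (fun best direction =>
        (PySem.List.pyRange 0 m 1).foldl (fun best start =>
          pvStep best (PySem.List.slice direction (some start) none ++
                       PySem.List.slice direction none (some start))) best) best) none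
  best.getD []   -- A returns None (not a tuple) on the empty path; Pre_ excludes it

-- ===== PORT B =====
-- seqs[s][j]: both indices the algorithm produces are nonnegative and in range, where this is exact
def pvNth (seqs : List (List (Int × Int))) (s j : Int) : Int × Int :=
  (PySem.List.pyGet? ((PySem.List.pyGet? seqs s).getD []) j).getD (0, 0)

-- min(...) over a nonempty list of pairs (Python raises ValueError on []; never reached: the
-- column loop runs only when the candidate pool is nonempty)
def pvMinPair : List (Int × Int) → Int × Int
  | [] => (0, 0)
  | h :: t => t.foldl (fun acc x => if pvPairLt x acc then x else acc) h

def canonical_form_alt (path : List (Int × Int)) (n : Int) : List (Int × Int) :=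
  let m : Int := (path.length : Int)
  let seqs : List (List (Int × Int)) :=
    ([fun r c => (r, c), fun r c => (c, n - 1 - r), fun r c => (n - 1 - r, n - 1 - c),
      fun r c => (n - 1 - c, r), fun r c => (r, n - 1 - c), fun r c => (n - 1 - r, c),
      fun r c => (c, r), fun r c => (n - 1 - c, n - 1 - r)] : List (Int → Int → Int × Int)).foldl
      (fun acc f =>
        let t := path.map (fun p => f p.1 p.2)
        let rt := t.reverse
        acc ++ [t ++ t, rt ++ rt]) []
  let cands0 : List (Int × Int) :=
    (PySem.List.pyRange 0 16 1).flatMap (fun s => (PySem.List.pyRange 0 m 1).map (fun i => (s, i)))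
  let cands :=
    (PySem.List.pyRange 0 m 1).foldl (fun cands k =>
      let lo := pvMinPair (cands.map (fun c => pvNth seqs c.1 (c.2 + k)))
      cands.filter (fun c => pvNth seqs c.1 (c.2 + k) == lo)) cands0
  match cands with
  | [] => []   -- Python raises IndexError at cands[0] here (only for the empty path); Pre_ excludes it
  | (s0, i0) :: _ =>
    PySem.List.slice ((PySem.List.pyGet? seqs s0).getD []) (some i0) (some (i0 + m))

-- ===== PRECONDITION & SPEC =====
-- Pre_ excludes only the empty path, on which A returns None (not a tuple of tuples) and B raises IndexError.
def Pre_canonical_form (path : List (Int × Int)) (n : Int) : Prop := path ≠ []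
instance (path : List (Int × Int)) (n : Int) : Decidable (Pre_canonical_form path n) := by unfold Pre_canonical_form; infer_instance

def pvWitness_canonical_form : (List (Int × Int)) × Int := ([(0, 0), (1, 2), (2, 0)], 3)

def Spec_canonical_form (path : List (Int × Int)) (n : Int) (out : List (Int × Int)) : Prop := out = canonical_form_alt path n
instance (path : List (Int × Int)) (n : Int) (out : List (Int × Int)) : Decidable (Spec_canonical_form path n out) := by unfold Spec_canonical_form; infer_instance

-- ===== CLAIM =====
def Claim_equal_canonical_form : Prop := ∀ (path : List (Int × Int)) (n : Int), Dom_canonical_form path n → Pre_canonical_form path n → Spec_canonical_form path n (canonical_form path n)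

-- ===== LEMMAS AND PROOFS =====
theorem pvPairLt_irrefl (a : Int × Int) : pvPairLt a a = false := by simp [pvPairLt]

theorem pvPairLt_trans (a b c : Int × Int) (h1 : pvPairLt a b = true) (h2 : pvPairLt b c = true) :
    pvPairLt a c = true := by
  simp [pvPairLt] at *; omega

theorem pvPairLt_total (a b : Int × Int) (h1 : pvPairLt a b = false) (h2 : pvPairLt b a = false) :
    a = b := by
  obtain ⟨a1, a2⟩ := a; obtain ⟨b1, b2⟩ := b
  simp [pvPairLt] at *
  constructor <;> omega

theorem pvLexLt_irrefl (u : List (Int × Int)) : pvLexLt u u = false := by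
  induction u with
  | nil => rfl
  | cons a t ih => simp [pvLexLt, pvPairLt_irrefl, ih]

theorem pvLexLt_trans (u v w : List (Int × Int)) (h1 : pvLexLt u v = true)
    (h2 : pvLexLt v w = true) : pvLexLt u w = true := by
  induction u generalizing v w with
  | nil =>
    cases v with
    | nil => simp [pvLexLt] at h1
    | cons b v' =>
      cases w with
      | nil => simp [pvLexLt] at h2
      | cons c w' => simp [pvLexLt]
  | cons a u' ih =>
    cases v with
    | nil => simp [pvLexLt] at h1
    | cons b v' =>
      cases w with
      | nil => simp [pvLexLt] at h2
      | cons c w' =>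
        simp [pvLexLt] at h1 h2 ⊢
        rcases h1 with h1 | ⟨hab, h1⟩
        · rcases h2 with h2 | ⟨hbc, h2⟩
          · exact Or.inl (pvPairLt_trans _ _ _ h1 h2)
          · subst hbc; exact Or.inl h1
        · subst hab
          rcases h2 with h2 | ⟨hbc, h2⟩
          · exact Or.inl h2
          · exact Or.inr ⟨hbc, ih _ _ h1 h2⟩

theorem pvLexLt_total (u v : List (Int × Int)) (h1 : pvLexLt u v = false)
    (h2 : pvLexLt v u = false) : u = v := by
  induction u generalizing v with
  | nil =>
    cases v with
    | nil => rfl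
    | cons b v' => simp [pvLexLt] at h1
  | cons a u' ih =>
    cases v with
    | nil => simp [pvLexLt] at h2
    | cons b v' =>
      simp [pvLexLt] at h1 h2
      have hab : a = b := pvPairLt_total _ _ h1.1 h2.1
      subst hab
      rw [ih v' (h1.2 rfl) (h2.2 rfl)]

theorem foldMin_spec {A : Type} (lt : A → A → Bool)
    (htr : ∀ a b c, lt a b = true → lt b c = true → lt a c = true)
    (htot : ∀ a b, lt a b = false → lt b a = false → a = b)
    (hirr : ∀ a, lt a a = false)
    (L : List A) (b : A) :
    (L.foldl (fun acc x => if lt x acc then x else acc) b ∈ b :: L) ∧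
    (∀ d ∈ b :: L, lt d (L.foldl (fun acc x => if lt x acc then x else acc) b) = false) := by
  induction L generalizing b with
  | nil => simp [hirr]
  | cons x t ih =>
    simp only [List.foldl_cons]
    obtain ⟨hmem, hlb⟩ := ih (if lt x b then x else b)
    set a' := if lt x b then x else b with ha'
    set r := t.foldl (fun acc y => if lt y acc then y else acc) a' with hr
    have har : lt a' r = false := hlb a' (by simp)
    have hlbt : ∀ d ∈ t, lt d r = false := fun d hd => hlb d (by simp [hd])
    have hxr : lt x r = false := by
      by_cases hxb : lt x b = true
      · have hax : a' = x := by rw [ha', if_pos hxb]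
        rw [hax] at har; exact har
      · have hxb' : lt x b = false := by revert hxb; cases lt x b <;> simp
        have hab : a' = b := by rw [ha', if_neg (by simp [hxb'])]
        rw [hab] at har
        by_contra hc
        have hxr' : lt x r = true := by revert hc; cases lt x r <;> simp
        by_cases hbx : lt b x = true
        · have h3 := htr _ _ _ hbx hxr'
          rw [h3] at har; exact absurd har (by simp)
        · have hbx' : lt b x = false := by revert hbx; cases lt b x <;> simp
          have hxe := htot _ _ hxb' hbx'
          rw [hxe] at hxr'; rw [hxr'] at har; exact absurd har (by simp)
    have hbr : lt b r = false := by
      by_cases hxb : lt x b = true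
      · have hax : a' = x := by rw [ha', if_pos hxb]
        rw [hax] at har
        by_contra hc
        have hbr' : lt b r = true := by revert hc; cases lt b r <;> simp
        have h3 := htr _ _ _ hxb hbr'
        rw [h3] at har; exact absurd har (by simp)
      · have hxb' : lt x b = false := by revert hxb; cases lt x b <;> simp
        have hab : a' = b := by rw [ha', if_neg (by simp [hxb'])]
        rw [hab] at har; exact har
    refine ⟨?_, ?_⟩
    · rcases List.mem_cons.1 hmem with h | h
      · rw [h, ha']; split <;> simp
      · simp [h]
    · intro d hd
      simp only [List.mem_cons] at hd
      rcases hd with rfl | rfl | hdt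
      · exact hbr
      · exact hxr
      · exact hlbt d hdt

-- rotations
def pvRot (s : List (Int × Int)) (i : Nat) : List (Int × Int) := s.drop i ++ s.take i
def pvRots (s : List (Int × Int)) : List (List (Int × Int)) := (List.range s.length).map (pvRot s)

-- A's running best threaded through a list of candidates is the running-minimum fold
theorem foldStep_eq (L : List (List (Int × Int))) (b : List (Int × Int)) :
    L.foldl pvStep (some b) = some (L.foldl (fun acc x => if pvLexLt x acc then x else acc) b) := by
  induction L generalizing b with
  | nil => rfl
  | cons x t ih =>
    simp only [List.foldl_cons, pvStep]
    split <;> exact ih _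

theorem foldStep_none_spec (L : List (List (Int × Int))) (h : L ≠ []) :
    ∃ c, L.foldl pvStep none = some c ∧ c ∈ L ∧ ∀ d ∈ L, pvLexLt d c = false := by
  cases L with
  | nil => exact absurd rfl h
  | cons x t =>
    refine ⟨t.foldl (fun acc y => if pvLexLt y acc then y else acc) x, ?_, ?_, ?_⟩
    · simpa [pvStep] using foldStep_eq t x
    · exact (foldMin_spec pvLexLt pvLexLt_trans pvLexLt_total pvLexLt_irrefl t x).1
    · exact (foldMin_spec pvLexLt pvLexLt_trans pvLexLt_total pvLexLt_irrefl t x).2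

-- A's inner start-loop produces exactly the rotation candidates of its direction
theorem innerFold (dir : List (Int × Int)) (b : Option (List (Int × Int))) :
    (PySem.List.pyRange 0 (dir.length : Int) 1).foldl (fun best start =>
      pvStep best (PySem.List.slice dir (some start) none ++
                   PySem.List.slice dir none (some start))) b
    = (pvRots dir).foldl pvStep b := by
  rw [PySem.List.pyRange_zero_nat, List.foldl_map]
  unfold pvRots
  rw [List.foldl_map]
  have hfun : (fun (best : Option (List (Int × Int))) (k : Nat) =>
      pvStep best (PySem.List.slice dir (some (k : Int)) none ++
                   PySem.List.slice dir none (some (k : Int))))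
      = fun best k => pvStep best (pvRot dir k) := by
    funext best k
    rw [PySem.List.slice_from_natCast, PySem.List.slice_to_natCast]
    rfl
  rw [hfun]

theorem minPair_spec (s : List (Int × Int)) (hs : s ≠ []) :
    pvMinPair s ∈ s ∧ ∀ x ∈ s, pvPairLt x (pvMinPair s) = false := by
  cases s with
  | nil => exact absurd rfl hs
  | cons h t =>
    exact foldMin_spec pvPairLt pvPairLt_trans pvPairLt_total pvPairLt_irrefl t h

-- the 16 direction sequences, in A's (= B's) scan order
def pvDirs (path : List (Int × Int)) (n : Int) : List (List (Int × Int)) :=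
  [apply_symmetry path 0 n, (apply_symmetry path 0 n).reverse,
   apply_symmetry path 1 n, (apply_symmetry path 1 n).reverse,
   apply_symmetry path 2 n, (apply_symmetry path 2 n).reverse,
   apply_symmetry path 3 n, (apply_symmetry path 3 n).reverse,
   apply_symmetry path 4 n, (apply_symmetry path 4 n).reverse,
   apply_symmetry path 5 n, (apply_symmetry path 5 n).reverse,
   apply_symmetry path 6 n, (apply_symmetry path 6 n).reverse,
   apply_symmetry path 7 n, (apply_symmetry path 7 n).reverse]

theorem innerFoldA (path : List (Int × Int)) (n sym : Int) (b : Option (List (Int × Int))) :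
    (PySem.List.pyRange 0 ((path.length : Int)) 1).foldl (fun best start =>
      pvStep best (PySem.List.slice (apply_symmetry path sym n) (some start) none ++
                   PySem.List.slice (apply_symmetry path sym n) none (some start))) b
    = (pvRots (apply_symmetry path sym n)).foldl pvStep b := by
  have h : (path.length : Int) = ((apply_symmetry path sym n).length : Int) := by
    simp [apply_symmetry]
  rw [h]; exact innerFold _ b

theorem innerFoldR (path : List (Int × Int)) (n sym : Int) (b : Option (List (Int × Int))) :
    (PySem.List.pyRange 0 ((path.length : Int)) 1).foldl (fun best start =>
      pvStep best (PySem.List.slice (apply_symmetry path sym n).reverse (some start) none ++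
                   PySem.List.slice (apply_symmetry path sym n).reverse none (some start))) b
    = (pvRots (apply_symmetry path sym n).reverse).foldl pvStep b := by
  have h : (path.length : Int) = (((apply_symmetry path sym n).reverse).length : Int) := by
    simp [apply_symmetry]
  rw [h]; exact innerFold _ b

theorem A_char (path : List (Int × Int)) (n : Int) :
    canonical_form path n = (((pvDirs path n).flatMap pvRots).foldl pvStep none).getD [] := by
  show ((PySem.List.pyRange 0 8 1).foldl (fun best sym =>
      [apply_symmetry path sym n, (apply_symmetry path sym n).reverse].foldl (fun best direction =>
        (PySem.List.pyRange 0 ((path.length : Int)) 1).foldl (fun best start =>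
          pvStep best (PySem.List.slice direction (some start) none ++
                       PySem.List.slice direction none (some start))) best) best) none).getD []
    = _
  rw [show PySem.List.pyRange 0 8 1 = ([0, 1, 2, 3, 4, 5, 6, 7] : List Int) from by decide]
  simp only [List.foldl_cons, List.foldl_nil, innerFoldA, innerFoldR]
  rw [pvDirs]
  simp only [List.flatMap_cons, List.flatMap_nil, List.append_nil, List.foldl_append]

-- every direction sequence has the path's length
theorem dirs_length (path : List (Int × Int)) (n : Int) :
    ∀ d ∈ pvDirs path n, d.length = path.length := by
  intro d hd
  simp only [pvDirs, List.mem_cons, List.not_mem_nil, or_false] at hd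
  rcases hd with rfl | rfl | rfl | rfl | rfl | rfl | rfl | rfl | rfl | rfl | rfl | rfl | rfl | rfl | rfl | rfl <;>
    simp [apply_symmetry]

-- B's seqs list is the 16 direction sequences, each doubled
theorem seqs_eq (path : List (Int × Int)) (n : Int) :
    (([fun r c => (r, c), fun r c => (c, n - 1 - r), fun r c => (n - 1 - r, n - 1 - c),
       fun r c => (n - 1 - c, r), fun r c => (r, n - 1 - c), fun r c => (n - 1 - r, c),
       fun r c => (c, r), fun r c => (n - 1 - c, n - 1 - r)] : List (Int → Int → Int × Int)).foldl
      (fun acc f =>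
        let t := path.map (fun p => f p.1 p.2)
        let rt := t.reverse
        acc ++ [t ++ t, rt ++ rt]) [])
    = (pvDirs path n).map (fun t => t ++ t) := by
  simp only [List.foldl_cons, List.foldl_nil, pvDirs, List.map_cons, List.map_nil,
    apply_symmetry, pvSymFun]
  norm_num

-- lexicographic comparison distributes over appends of equal-length prefixes
theorem pvLexLt_append (u v a b : List (Int × Int)) (h : u.length = v.length) :
    pvLexLt (u ++ a) (v ++ b) = (pvLexLt u v || (u == v && pvLexLt a b)) := by
  induction u generalizing v with
  | nil =>
    cases v with
    | nil => simp [pvLexLt]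
    | cons y v' => simp at h
  | cons x u' ih =>
    cases v with
    | nil => simp at h
    | cons y v' =>
      simp only [List.length_cons] at h
      simp only [List.cons_append, pvLexLt, ih v' (by omega), List.cons_beq_cons]
      cases pvPairLt x y <;> cases hxy : (x == y) <;>
        cases pvLexLt u' v' <;> cases pvLexLt a b <;> simp

-- take (k+1) splits off the k-th element
theorem take_succ_getD (l : List (Int × Int)) (k : Nat) (h : k < l.length) :
    l.take (k + 1) = l.take k ++ [l.getD k (0, 0)] := by
  rw [List.take_add_one, List.getD_eq_getElem?_getD, List.getElem?_eq_getElem h]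
  rfl

-- the (i+k)-th cell of the doubled list is the k-th cell of rotation i
theorem doubled_col (t : List (Int × Int)) (i k : Nat) (hi : i < t.length) (hk : k < t.length) :
    (t ++ t).getD (i + k) (0, 0) = (pvRot t i).getD k (0, 0) := by
  have hd : (t.drop i).length = t.length - i := List.length_drop
  rw [List.getD_eq_getElem?_getD, List.getD_eq_getElem?_getD, pvRot]
  by_cases h : i + k < t.length
  · rw [List.getElem?_append_left h, List.getElem?_append_left (by rw [hd]; omega),
      List.getElem?_drop]
  · have h2 : (t.drop i).length ≤ k := by rw [hd]; omega
    rw [List.getElem?_append_right (by omega : t.length ≤ i + k),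
      List.getElem?_append_right h2, hd]
    have h5 : k - (t.length - i) < i := by omega
    rw [List.getElem?_take_of_lt h5]
    have h6 : i + k - t.length = k - (t.length - i) := by omega
    rw [h6]

-- slicing the doubled list at [i, i+m) is rotation i
theorem doubled_slice (t : List (Int × Int)) (i : Nat) (hi : i < t.length) :
    ((t ++ t).drop i).take t.length = pvRot t i := by
  rw [List.drop_append_of_le_length (by omega), pvRot, List.take_append]
  congr 1
  · exact List.take_of_length_le (by simp [List.length_drop])
  · congr 1
    simp [List.length_drop]
    omega

-- ===== the column-elimination invariant =====
-- After k rounds the pool is exactly the candidates whose rotation has the minimal k-prefix p.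
def pvInv (R : Int × Int → List (Int × Int)) (all : List (Int × Int))
    (k : Nat) (p : List (Int × Int)) (C : List (Int × Int)) : Prop :=
  C ≠ [] ∧ (∀ c ∈ C, c ∈ all) ∧ (∀ c ∈ C, (R c).take k = p) ∧
  (∀ c ∈ all, pvLexLt ((R c).take k) p = false) ∧
  (∀ c ∈ all, (R c).take k = p → c ∈ C)

theorem pvInv_step (R : Int × Int → List (Int × Int)) (all : List (Int × Int)) (m : Nat)
    (hlen : ∀ c ∈ all, (R c).length = m)
    (col : Int × Int → Nat → Int × Int)
    (hcol : ∀ c ∈ all, ∀ k, k < m → col c k = (R c).getD k (0, 0))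
    (k : Nat) (hk : k < m) (p C : List (Int × Int))
    (h : pvInv R all k p C) :
    pvInv R all (k + 1) (p ++ [pvMinPair (C.map (fun c => col c k))])
      (C.filter (fun c => col c k == pvMinPair (C.map (fun c => col c k)))) := by
  obtain ⟨hne, hsub, heq, hmin, hcomp⟩ := h
  have hmapne : C.map (fun c => col c k) ≠ [] := by
    intro hcon; exact hne (List.map_eq_nil_iff.1 hcon)
  obtain ⟨hlomem, hlolb⟩ := minPair_spec _ hmapne
  have hplen : p.length = k := by
    cases C with
    | nil => exact absurd rfl hne
    | cons c0 t =>
      have h1 := heq c0 (by simp)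
      have h2 := hlen c0 (hsub c0 (by simp))
      rw [← h1, List.length_take]
      omega
  have hColEq : ∀ c ∈ C, col c k = (R c).getD k (0, 0) := fun c hc => hcol c (hsub c hc) k hk
  refine ⟨?_, ?_, ?_, ?_, ?_⟩
  · -- nonempty: the candidate realizing the column minimum survives the filter
    obtain ⟨c, hcC, hcv⟩ := List.mem_map.1 hlomem
    have : c ∈ C.filter (fun c => col c k == pvMinPair (C.map (fun c => col c k))) := by
      apply List.mem_filter.2
      exact ⟨hcC, by simp [hcv]⟩
    exact List.ne_nil_of_mem this
  · intro c hc
    exact hsub c (List.mem_filter.1 hc).1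
  · intro c hc
    obtain ⟨hcC, hcv⟩ := List.mem_filter.1 hc
    have hv : col c k = pvMinPair (C.map (fun c => col c k)) := by simpa using hcv
    rw [take_succ_getD (R c) k (by rw [hlen c (hsub c hcC)]; exact hk),
      heq c hcC, ← hColEq c hcC, hv]
  · intro c hc
    have hclen : (R c).length = m := hlen c hc
    rw [take_succ_getD (R c) k (by omega)]
    rw [pvLexLt_append _ _ _ _ (by rw [List.length_take]; omega)]
    have h1 : pvLexLt ((R c).take k) p = false := hmin c hc
    rw [h1]
    by_cases h2 : (R c).take k = p
    · have hcC : c ∈ C := hcomp c hc h2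
      have h3 : pvPairLt ((R c).getD k (0, 0)) (pvMinPair (C.map (fun c => col c k))) = false := by
        rw [← hColEq c hcC]
        exact hlolb _ (List.mem_map.2 ⟨c, hcC, rfl⟩)
      rw [List.getD_eq_getElem?_getD] at h3
      simp [pvLexLt, h3]
    · have h4 : ((R c).take k == p) = false := by
        simp only [beq_eq_false_iff_ne, ne_eq]
        exact h2
      simp [h4]
  · intro c hc hpref
    have hclen : (R c).length = m := hlen c hc
    rw [take_succ_getD (R c) k (by omega)] at hpref
    obtain ⟨hp1, hp2⟩ := List.append_inj hpref (by rw [List.length_take, hplen]; omega)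
    have hcC : c ∈ C := hcomp c hc hp1
    apply List.mem_filter.2
    refine ⟨hcC, ?_⟩
    have hval : (R c).getD k (0, 0) = pvMinPair (C.map (fun c => col c k)) := by
      injection hp2
    rw [hColEq c hcC]
    rw [List.getD_eq_getElem?_getD] at hval
    simp [hval]

-- running the elimination loop from round a for len rounds
theorem pvInv_fold (R : Int × Int → List (Int × Int)) (all : List (Int × Int)) (m : Nat)
    (hlen : ∀ c ∈ all, (R c).length = m)
    (col : Int × Int → Nat → Int × Int)
    (hcol : ∀ c ∈ all, ∀ k, k < m → col c k = (R c).getD k (0, 0))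
    (len a : Nat) (hle : a + len ≤ m) (p C : List (Int × Int))
    (h : pvInv R all a p C) :
    ∃ p', pvInv R all (a + len)
      p' ((List.range' a len).foldl
        (fun C k => C.filter (fun c => col c k == pvMinPair (C.map (fun c => col c k)))) C) := by
  induction len generalizing a p C with
  | zero => exact ⟨p, h⟩
  | succ l ih =>
    have hstep := pvInv_step R all m hlen col hcol a (by omega) p C h
    have hrec := ih (a + 1) (by omega) _ _ hstep
    obtain ⟨p', hp'⟩ := hrec
    refine ⟨p', ?_⟩
    have harith : a + 1 + l = a + (l + 1) := by omega
    rw [harith] at hp'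
    simpa [List.range'] using hp'

-- membership in B's initial candidate pool
theorem mem_cands0 (m : Nat) (c : Int × Int) :
    c ∈ ((PySem.List.pyRange 0 16 1).flatMap
        (fun s => (PySem.List.pyRange 0 ((m : Nat) : Int) 1).map (fun i => (s, i))))
      ↔ ∃ s : Nat, s < 16 ∧ ∃ i : Nat, i < m ∧ c = ((s : Int), (i : Int)) := by
  rw [show ((16 : Int)) = (((16 : Nat) : Int)) from by norm_num, PySem.List.pyRange_zero_nat,
    PySem.List.pyRange_zero_nat]
  simp only [List.mem_flatMap, List.mem_map, List.mem_range]
  constructor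
  · rintro ⟨si, ⟨s, hs, rfl⟩, i, ⟨j, hj, rfl⟩, rfl⟩
    exact ⟨s, hs, j, hj, rfl⟩
  · rintro ⟨s, hs, j, hj, rfl⟩
    exact ⟨(s : Int), ⟨s, hs, rfl⟩, (j : Int), ⟨j, hj, rfl⟩, rfl⟩

theorem main_eq (path : List (Int × Int)) (n : Int) (hpre : path ≠ []) :
    canonical_form path n = canonical_form_alt path n := by
  set m : Nat := path.length with hm
  have hm0 : 0 < m := by cases path with | nil => exact absurd rfl hpre | cons a t => simp [hm]
  set dirs := pvDirs path n with hdirs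
  have hdlen : ∀ d ∈ dirs, d.length = m := dirs_length path n
  have hdirslen : dirs.length = 16 := by rw [hdirs, pvDirs]; rfl
  -- the rotation of a candidate
  set R : Int × Int → List (Int × Int) :=
    fun c => pvRot (dirs.getD c.1.toNat []) c.2.toNat with hR
  set seqs := dirs.map (fun t => t ++ t) with hseqs
  set all := ((PySem.List.pyRange 0 16 1).flatMap
      (fun s => (PySem.List.pyRange 0 ((m : Nat) : Int) 1).map (fun i => (s, i)))) with hall
  have hallmem : ∀ c, c ∈ all ↔
      ∃ s : Nat, s < 16 ∧ ∃ i : Nat, i < m ∧ c = ((s : Int), (i : Int)) := fun c => mem_cands0 m c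
  have hgd' : ∀ s : Nat, ∀ hsl : s < dirs.length, dirs.getD s [] = dirs[s]'hsl := by
    intro s hsl
    simp [List.getD_eq_getElem?_getD, List.getElem?_eq_getElem hsl]
  have hRlen : ∀ c ∈ all, (R c).length = m := by
    intro c hc
    obtain ⟨s, hs, i, hi, rfl⟩ := (hallmem c).1 hc
    have hsl : s < dirs.length := by omega
    have hdl : dirs[s].length = m := hdlen _ (List.getElem_mem hsl)
    show (pvRot (dirs.getD (((s : Nat) : Int)).toNat []) (((i : Nat) : Int)).toNat).length = m
    rw [Int.toNat_natCast, Int.toNat_natCast, hgd' s hsl]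
    simp [pvRot, hdl]
    omega
  -- the column read by the port equals the rotation's cell
  have hcol : ∀ c ∈ all, ∀ k, k < m →
      pvNth seqs c.1 (c.2 + (k : Int)) = (R c).getD k (0, 0) := by
    intro c hc k hk
    obtain ⟨s, hs, i, hi, rfl⟩ := (hallmem c).1 hc
    have hsl : s < dirs.length := by omega
    have hdl : dirs[s].length = m := hdlen _ (List.getElem_mem hsl)
    have hget : PySem.List.pyGet? seqs ((s : Nat) : Int) = some (dirs[s] ++ dirs[s]) := by
      rw [PySem.List.pyGet?_natCast, hseqs, List.getElem?_map, List.getElem?_eq_getElem hsl]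
      rfl
    have hcast : ((i : Nat) : Int) + ((k : Nat) : Int) = (((i + k : Nat)) : Int) := by push_cast; ring
    show pvNth seqs ((s : Nat) : Int) ((((i : Nat) : Int)) + ((k : Nat) : Int)) = _
    simp only [pvNth, hget, Option.getD_some, hcast, PySem.List.pyGet?_natCast]
    have h1 : (dirs[s] ++ dirs[s])[i + k]?.getD (0, 0) = (dirs[s] ++ dirs[s]).getD (i + k) (0, 0) := by
      rw [List.getD_eq_getElem?_getD]
    rw [h1, doubled_col dirs[s] i k (by omega) (by omega)]
    show (pvRot dirs[s] i).getD k (0, 0)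
      = (pvRot (dirs.getD (((s : Nat) : Int)).toNat []) (((i : Nat) : Int)).toNat).getD k (0, 0)
    rw [Int.toNat_natCast, Int.toNat_natCast, hgd' s hsl]
  -- the base invariant
  have hmem00 : (((0 : Nat) : Int), ((0 : Nat) : Int)) ∈ all :=
    (hallmem _).2 ⟨0, by omega, 0, by omega, rfl⟩
  have hbase : pvInv R all 0 [] all := by
    refine ⟨List.ne_nil_of_mem hmem00, fun c hc => hc, by simp, by simp [pvLexLt], fun c hc _ => hc⟩
  -- run the loop
  obtain ⟨p, hinv⟩ := pvInv_fold R all m hRlen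
    (fun c k => pvNth seqs c.1 (c.2 + (k : Int))) hcol m 0 (by omega) [] all hbase
  rw [Nat.zero_add] at hinv
  -- identify the port's fold with the range' fold
  have hfold :
      (PySem.List.pyRange 0 ((m : Nat) : Int) 1).foldl (fun cands k =>
        cands.filter (fun c => pvNth seqs c.1 (c.2 + k) ==
          pvMinPair (cands.map (fun c => pvNth seqs c.1 (c.2 + k))))) all
      = (List.range' 0 m).foldl
        (fun C k => C.filter (fun c => pvNth seqs c.1 (c.2 + (k : Int)) ==
          pvMinPair (C.map (fun c => pvNth seqs c.1 (c.2 + (k : Int)))))) all := by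
    rw [PySem.List.pyRange_zero_nat, List.foldl_map, List.range_eq_range']
  set Cf := (List.range' 0 m).foldl
      (fun C k => C.filter (fun c => pvNth seqs c.1 (c.2 + (k : Int)) ==
        pvMinPair (C.map (fun c => pvNth seqs c.1 (c.2 + (k : Int)))))) all with hCf
  obtain ⟨hfne, hfsub, hfeq, hfmin, _⟩ := hinv
  -- survivors' rotations equal p; all rotations are ≥ p
  have hRfull : ∀ c ∈ all, (R c).take m = R c := fun c hc =>
    List.take_of_length_le (by rw [hRlen c hc])
  have hfeq' : ∀ c ∈ Cf, R c = p := by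
    intro c hc
    rw [← hRfull c (hfsub c hc)]
    exact hfeq c hc
  have hfmin' : ∀ c ∈ all, pvLexLt (R c) p = false := by
    intro c hc
    rw [← hRfull c hc]
    exact hfmin c hc
  -- relate all candidates with the rotations A scans
  have hRotsAll : ∀ e ∈ dirs.flatMap pvRots, ∃ c ∈ all, R c = e := by
    intro e he
    obtain ⟨d, hdD, hde⟩ := List.mem_flatMap.1 he
    obtain ⟨s, hsl, hds⟩ := List.mem_iff_getElem.1 hdD
    obtain ⟨i, hir, hie⟩ := List.mem_map.1 hde
    have hil : i < m := by rw [List.mem_range] at hir; rw [← hdlen d hdD]; exact hir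
    refine ⟨(((s : Nat) : Int), ((i : Nat) : Int)), (hallmem _).2 ⟨s, by omega, i, hil, rfl⟩, ?_⟩
    show pvRot (dirs.getD (((s : Nat) : Int)).toNat []) (((i : Nat) : Int)).toNat = e
    rw [Int.toNat_natCast, Int.toNat_natCast, hgd' s hsl, hds]
    exact hie
  have hAllRots : ∀ c ∈ all, R c ∈ dirs.flatMap pvRots := by
    intro c hc
    obtain ⟨s, hs, i, hi, rfl⟩ := (hallmem c).1 hc
    have hsl : s < dirs.length := by omega
    apply List.mem_flatMap.2
    refine ⟨dirs[s], List.getElem_mem hsl, ?_⟩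
    have hRe : R (((s : Nat) : Int), ((i : Nat) : Int)) = pvRot dirs[s] i := by
      show pvRot (dirs.getD (((s : Nat) : Int)).toNat []) (((i : Nat) : Int)).toNat = _
      rw [Int.toNat_natCast, Int.toNat_natCast, hgd' s hsl]
    rw [hRe]
    exact List.mem_map.2 ⟨i, List.mem_range.2 (by rw [hdlen _ (List.getElem_mem hsl)]; omega), rfl⟩
  -- A's value
  have hLne : dirs.flatMap pvRots ≠ [] := List.ne_nil_of_mem (hAllRots _ hmem00)
  obtain ⟨cA, hAfold, hAmem, hAlb⟩ := foldStep_none_spec _ hLne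
  -- A's minimum equals p
  have hAp : cA = p := by
    obtain ⟨c0, hc0⟩ := List.exists_mem_of_ne_nil Cf hfne
    have hc0all := hfsub c0 hc0
    have h1 : pvLexLt cA p = false := by
      obtain ⟨c', hc', hce⟩ := hRotsAll cA hAmem
      rw [← hce]; exact hfmin' c' hc'
    have h2 : pvLexLt p cA = false := by
      rw [← hfeq' c0 hc0]
      exact hAlb _ (hAllRots c0 hc0all)
    exact pvLexLt_total _ _ h1 h2
  -- B's output
  have hB : canonical_form_alt path n = p := by
    unfold canonical_form_alt
    rw [seqs_eq path n]
    simp only [← hseqs, ← hm, ← hall, ← hdirs]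
    rw [hfold]
    rcases hCfv : Cf with _ | ⟨⟨s0, i0⟩, rest⟩
    · exact absurd hCfv hfne
    · have hc0 : (s0, i0) ∈ Cf := by rw [hCfv]; simp
      obtain ⟨s, hs, i, hi, hci⟩ := (hallmem _).1 (hfsub _ hc0)
      have hs0 : s0 = (s : Int) := by injection hci
      have hi0 : i0 = (i : Int) := by injection hci
      subst hs0; subst hi0
      have hsl : s < dirs.length := by omega
      show PySem.List.slice ((PySem.List.pyGet? seqs ((s : Nat) : Int)).getD [])
        (some ((i : Nat) : Int)) (some (((i : Nat) : Int) + ((m : Nat) : Int))) = p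
      have hdl : dirs[s].length = m := hdlen _ (List.getElem_mem hsl)
      have hget : PySem.List.pyGet? seqs ((s : Nat) : Int) = some (dirs[s] ++ dirs[s]) := by
        rw [PySem.List.pyGet?_natCast, hseqs, List.getElem?_map, List.getElem?_eq_getElem hsl]
        rfl
      rw [hget]
      simp only [Option.getD_some]
      rw [PySem.List.slice_natCast_add]
      have hds2 : ((dirs[s] ++ dirs[s]).drop i).take m = pvRot dirs[s] i := by
        rw [← hdl]
        exact doubled_slice dirs[s] i (by omega)
      rw [hds2]
      have hRv := hfeq' _ hc0
      have hRe : R (((s : Nat) : Int), ((i : Nat) : Int)) = pvRot dirs[s] i := by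
        show pvRot (dirs.getD (((s : Nat) : Int)).toNat []) (((i : Nat) : Int)).toNat = _
        rw [Int.toNat_natCast, Int.toNat_natCast, hgd' s hsl]
      rw [hRe] at hRv
      exact hRv
  rw [A_char, ← hdirs, hAfold, Option.getD_some, hAp, hB]

-- ===== VERDICT =====
theorem canonical_form_spec : Claim_equal_canonical_form := by
  intro path n _hdom hpre
  show canonical_form path n = canonical_form_alt path n
  exact main_eq path n hpre
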